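-- pv_equiv track=rewrite | github.com/yonsweng/ps | codeforces/1579/e1.py | solve
-- ===== SOURCE A (Python) =====
-- from collections import deque
--
-- def solve(n, p):
--     answer = deque()
--
--     for pi in p:
--         if len(answer) == 0 or pi < answer[0]:
--             answer.appendleft(pi)
--         else:
--             answer.append(pi)
--
--     return ' '.join(map(str, answer))
-- ===== SOURCE B (Python) =====
-- def solve(n, p):
--     # pass 1: prefix-minimum array
--     mins = []
--     m = None
--     for x in p:
--         m = x if m is None else min(m, x)
--         mins.append(m)
--     # prev[i] = minimum of p[:i] (None for i == 0)
--     prev = [None] + mins[:-1]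
--     # pass 2/3: partition by comparison with the previous prefix minimum
--     front = [x for x, mn in zip(p, prev) if mn is None or x < mn]
--     back = [x for x, mn in zip(p, prev) if mn is not None and x >= mn]
--     return ' '.join(map(str, front[::-1] + back))
-- ===== Notes on version B (the rewrite author's own statement) =====
-- stated objective: alternative
-- what changed: Instead of building the answer online in a deque, B computes a prefix-minimum array in a first pass, then partitions the elements by comparing each with the previous prefix minimum in two comprehension passes, and assembles reversed-front + back at the end.
import Mathlib
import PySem

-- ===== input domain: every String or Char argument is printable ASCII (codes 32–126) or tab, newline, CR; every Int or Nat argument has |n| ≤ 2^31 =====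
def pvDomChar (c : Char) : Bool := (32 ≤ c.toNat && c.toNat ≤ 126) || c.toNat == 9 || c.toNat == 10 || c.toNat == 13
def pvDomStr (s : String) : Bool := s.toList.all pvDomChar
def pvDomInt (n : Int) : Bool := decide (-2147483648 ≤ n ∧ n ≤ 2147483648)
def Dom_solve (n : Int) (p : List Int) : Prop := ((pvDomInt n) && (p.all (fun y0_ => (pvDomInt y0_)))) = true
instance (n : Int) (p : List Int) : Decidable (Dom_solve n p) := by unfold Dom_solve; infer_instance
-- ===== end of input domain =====

-- B replaces the online deque with a staged pipeline: prefix-minimum array, then two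
-- partition passes against the previous prefix minimum, then reverse-and-concatenate.

-- ===== PORT A =====
-- the deque 'answer': appendleft = cons, append = ++ [pi]; 'len == 0 or pi < answer[0]' via match
def solveLoopA (ans : List Int) (p : List Int) : List Int :=
  p.foldl (fun ans pi =>
    match ans with
    | [] => pi :: ans
    | a :: _ => if pi < a then pi :: ans else ans ++ [pi]) ans

def solve (n : Int) (p : List Int) : String :=
  PySem.Str.join " " ((solveLoopA [] p).map PySem.Int.toStr)

-- ===== PORT B =====
-- pass 1 of Source B: the loop building 'mins' with running minimum m (None before the first element)
def prefMinsF (st : List Int × Option Int) (p : List Int) : List Int × Option Int :=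
  p.foldl (fun st x =>
    let m' := match st.2 with | none => x | some v => min v x
    (st.1 ++ [m'], some m')) st

def prefMins (p : List Int) : List Int := (prefMinsF ([], none) p).1

-- 'prev = [None] + mins[:-1]'
def prevMins (p : List Int) : List (Option Int) := none :: (prefMins p).dropLast.map some

-- '[x for x, mn in zip(p, prev) if mn is None or x < mn]'
def frontOf (p : List Int) : List Int :=
  ((p.zip (prevMins p)).filter
    (fun xm => match xm.2 with | none => true | some v => decide (xm.1 < v))).map Prod.fst

-- '[x for x, mn in zip(p, prev) if mn is not None and x >= mn]'
def backOf (p : List Int) : List Int :=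
  ((p.zip (prevMins p)).filter
    (fun xm => match xm.2 with | none => false | some v => decide (v ≤ xm.1))).map Prod.fst

def solve_alt (n : Int) (p : List Int) : String :=
  PySem.Str.join " " (((frontOf p).reverse ++ backOf p).map PySem.Int.toStr)

-- ===== PRECONDITION & SPEC =====
def Spec_solve (n : Int) (p : List Int) (out : String) : Prop := out = solve_alt n p
instance (n : Int) (p : List Int) (out : String) : Decidable (Spec_solve n p out) := by unfold Spec_solve; infer_instance

-- ===== CLAIM (what is proved, stated in full; the proofs are below) =====
def Claim_equal_solve : Prop := ∀ (n : Int) (p : List Int), Dom_solve n p → Spec_solve n p (solve n p)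

-- ===== LEMMAS AND PROOFS =====

theorem prefMinsF_append (st : List Int × Option Int) (q : List Int) (x : Int) :
    prefMinsF st (q ++ [x]) =
      ((prefMinsF st q).1 ++ [match (prefMinsF st q).2 with | none => x | some v => min v x],
        some (match (prefMinsF st q).2 with | none => x | some v => min v x)) := by
  simp [prefMinsF, List.foldl_append]

theorem prefMinsF_snd_last (q : List Int) : ∀ (st : List Int × Option Int),
    st.2 = st.1.getLast? → (prefMinsF st q).2 = (prefMinsF st q).1.getLast? := by
  induction q with
  | nil => intro st h; simpa [prefMinsF] using h
  | cons x q ih =>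
    intro st h
    simp only [prefMinsF, List.foldl_cons]
    exact ih _ (by simp)

theorem prefMinsF_len (q : List Int) : ∀ (st : List Int × Option Int),
    (prefMinsF st q).1.length = st.1.length + q.length := by
  induction q with
  | nil => intro st; simp [prefMinsF]
  | cons x q ih =>
    intro st
    simp only [prefMinsF, List.foldl_cons] at *
    rw [ih]; simp; omega

theorem main_inv (p : List Int) :
    solveLoopA [] p = (frontOf p).reverse ++ backOf p ∧
    (solveLoopA [] p).head? = (prefMinsF ([], none) p).2 := by
  induction p using List.reverseRecOn with
  | nil => constructor <;> simp [solveLoopA, frontOf, backOf, prevMins, prefMins, prefMinsF]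
  | append_singleton q x ih =>
    obtain ⟨hA, hH⟩ := ih
    by_cases hq0 : q = []
    · subst hq0
      constructor <;>
        simp [solveLoopA, frontOf, backOf, prevMins, prefMins, prefMinsF]
    · -- q nonempty: mins(q) nonempty, its last element is the current minimum mlast
      have hlen : (prefMins q).length = q.length := by
        simpa [prefMins] using prefMinsF_len q ([], none)
      have hpos : 0 < q.length := List.length_pos_of_ne_nil hq0
      have hmne : prefMins q ≠ [] := by
        intro h; rw [h] at hlen; simp at hlen; omega
      obtain ⟨mlast, hml⟩ : ∃ m, (prefMins q).getLast? = some m :=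
        Option.ne_none_iff_exists'.mp (by simpa using hmne)
      have hsnd : (prefMinsF ([], none) q).2 = some mlast := by
        rw [prefMinsF_snd_last q ([], none) (by simp)]; exact hml
      -- decomposition of pass 1 on q ++ [x]
      have hminsApp : prefMins (q ++ [x]) = prefMins q ++ [min mlast x] := by
        simp [prefMins, prefMinsF_append, hsnd]
      -- prev(q ++ [x]) = prev(q) ++ [some mlast]
      have hsplit : (prefMins q).dropLast ++ [mlast] = prefMins q := by
        have h1 := List.dropLast_concat_getLast hmne
        have h2 : (prefMins q).getLast hmne = mlast := by
          rw [List.getLast?_eq_some_getLast hmne] at hml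
          exact Option.some_inj.mp hml
        rw [h2] at h1; exact h1
      have hprevApp : prevMins (q ++ [x]) = prevMins q ++ [some mlast] := by
        unfold prevMins
        rw [hminsApp, List.dropLast_concat, ← hsplit]
        simp
      have hprevLen : q.length = (prevMins q).length := by
        simp [prevMins, List.length_dropLast, hlen]
        omega
      have hzipApp : (q ++ [x]).zip (prevMins (q ++ [x])) =
          q.zip (prevMins q) ++ [(x, some mlast)] := by
        rw [hprevApp, List.zip_append hprevLen]
        simp
      have hfrontApp : frontOf (q ++ [x]) =
          frontOf q ++ (if x < mlast then [x] else []) := by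
        unfold frontOf; rw [hzipApp, List.filter_append]
        by_cases h : x < mlast <;> simp [h]
      have hbackApp : backOf (q ++ [x]) =
          backOf q ++ (if x < mlast then [] else [x]) := by
        unfold backOf; rw [hzipApp, List.filter_append]
        by_cases h : x < mlast
        · simp [h, not_le.mpr h]
        · simp [h, not_lt.mp h]
      -- A's deque is nonempty with head mlast
      rw [hsnd] at hH
      obtain ⟨d, hd⟩ : ∃ d, solveLoopA [] q = mlast :: d := by
        cases hdq : solveLoopA [] q with
        | nil => rw [hdq] at hH; simp at hH
        | cons a d => rw [hdq] at hH; simp at hH; exact ⟨d, by rw [hH]⟩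
      have hstep : solveLoopA [] (q ++ [x]) =
          (if x < mlast then x :: (mlast :: d) else (mlast :: d) ++ [x]) := by
        simp only [solveLoopA, List.foldl_append]
        rw [show (List.foldl _ [] q : List Int) = mlast :: d from hd]
        by_cases h : x < mlast <;> simp [h]
      rw [hd] at hA
      constructor
      · rw [hstep, hfrontApp, hbackApp]
        by_cases h : x < mlast <;> simp [h, hA]
      · rw [hstep]
        rw [show prefMinsF ([], none) (q ++ [x]) = _ from prefMinsF_append ([], none) q x, hsnd]
        by_cases h : x < mlast <;> simp [h] <;> omega

-- ===== VERDICT (by name: the statement is the Claim_ definition above) =====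
theorem solve_spec : Claim_equal_solve := by
  intro n p _
  unfold Spec_solve solve solve_alt
  rw [(main_inv p).1]
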